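-- pv_equiv track=rewrite | github.com/neel-kumar/BoneProject | cleanCT/classify_rods_plates.py | check_26_connectivity_8ring
-- ===== SOURCE A (Python) =====
-- def check_26_connectivity_8ring(black_offsets):
--     if not black_offsets:
--         return True
--     visited = {black_offsets[0]}
--     stack = [black_offsets[0]]
--     while stack:
--         curr = stack.pop()
--         for other in black_offsets:
--             if other not in visited:
--                 if max(abs(curr[0]-other[0]), abs(curr[1]-other[1]), abs(curr[2]-other[2])) <= 1:
--                     visited.add(other)
--                     stack.append(other)
--     return len(visited) == len(black_offsets)
-- ===== SOURCE B (Python) =====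
-- # probe the 3x3x3 block of cells around a point; the zero offset is included because
-- # several distinct points may share the same (first three coordinates) cell
-- _OFFSETS = [(dx, dy, dz)
--             for dx in (-1, 0, 1) for dy in (-1, 0, 1) for dz in (-1, 0, 1)]
--
--
-- def check_26_connectivity_8ring(black_offsets):
--     if not black_offsets:
--         return True
--     buckets = {}
--     for p in black_offsets:
--         buckets.setdefault((p[0], p[1], p[2]), []).append(p)
--     start = black_offsets[0]
--     seen = {start}
--     stack = [start]
--     while stack:
--         curr = stack.pop()
--         x, y, z = curr[0], curr[1], curr[2]
--         for dx, dy, dz in _OFFSETS: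
--             for q in buckets.get((x + dx, y + dy, z + dz), ()):
--                 if q not in seen:
--                     seen.add(q)
--                     stack.append(q)
--     return len(seen) == len(black_offsets)
-- ===== Notes on version B (the rewrite author's own statement) =====
-- stated objective: alternative
-- what changed: Instead of rescanning the whole point list for Chebyshev-adjacent unvisited points at every DFS pop, B groups the points once into a dict of 3D cells keyed by their first three coordinates and probes only the 27 fixed neighbouring cells of the popped point, making each DFS step O(1) expected.
-- outside the precondition, e.g. on check_26_connectivity_8ring([(0, 0)]): A returns True, B raises IndexError; on check_26_connectivity_8ring([(1, 2), (1, 2)]): A returns False, B raises IndexError; on check_26_connectivity_8ring([(5,)]): A returns True, B raises IndexError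
import Mathlib
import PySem

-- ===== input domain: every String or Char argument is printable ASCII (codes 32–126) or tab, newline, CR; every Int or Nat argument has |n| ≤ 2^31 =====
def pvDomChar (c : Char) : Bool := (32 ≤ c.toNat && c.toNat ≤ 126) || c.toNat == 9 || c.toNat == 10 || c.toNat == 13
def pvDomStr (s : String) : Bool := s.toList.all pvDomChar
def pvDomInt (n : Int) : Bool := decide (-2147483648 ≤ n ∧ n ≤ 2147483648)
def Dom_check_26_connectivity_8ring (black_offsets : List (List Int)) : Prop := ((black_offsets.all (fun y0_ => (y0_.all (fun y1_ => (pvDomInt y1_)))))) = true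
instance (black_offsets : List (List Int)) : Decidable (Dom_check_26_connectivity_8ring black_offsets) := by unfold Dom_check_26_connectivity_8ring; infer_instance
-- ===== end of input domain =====

-- B replaces A's rescan-the-whole-list-per-pop DFS by a dict of 3D cells built once and
-- probed at the 27 fixed neighbouring cells of each popped point (a different algorithm).


-- ===== PORT A =====
-- max(abs(curr[0]-other[0]), abs(curr[1]-other[1]), abs(curr[2]-other[2]))
def chebA (curr other : List Int) : Int :=
  max (max |PySem.List.pyGetD curr 0 0 - PySem.List.pyGetD other 0 0|
           |PySem.List.pyGetD curr 1 0 - PySem.List.pyGetD other 1 0|)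
      |PySem.List.pyGetD curr 2 0 - PySem.List.pyGetD other 2 0|

-- the 'while stack:' loop of A; fuel 2*n+1 is proved sufficient below (dfs_fuel arithmetic)
def loopA (black_offsets : List (List Int)) :
    Nat → PySem.Set (List Int) → List (List Int) → PySem.Set (List Int)
  | 0, visited, _ => visited
  | fuel + 1, visited, stack =>
    match PySem.List.pop? stack (-1) with    -- curr = stack.pop()
    | none => visited
    | some (curr, rest) =>
      let st := black_offsets.foldl
        (fun (vs : PySem.Set (List Int) × List (List Int)) other =>
          if PySem.Set.contains vs.1 other then vs      -- 'if other not in visited'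
          else if chebA curr other ≤ 1 then (PySem.Set.add vs.1 other, vs.2 ++ [other])
          else vs)
        (visited, rest)
      loopA black_offsets fuel st.1 st.2

def check_26_connectivity_8ring (black_offsets : List (List Int)) : Bool :=
  if black_offsets = [] then true
  else
    let first := PySem.List.pyGetD black_offsets 0 []   -- black_offsets[0] (list nonempty)
    let visited := loopA black_offsets (2 * black_offsets.length + 1)
        (PySem.Set.add PySem.Set.empty first) [first]
    PySem.Set.len visited == PySem.List.len black_offsets

-- ===== PORT B =====
-- _OFFSETS comprehension: all 27 triples over (-1,0,1)^3 (the zero offset is included: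
-- distinct points may share the same first-three-coordinates cell)
def offsets27 : List (Int × Int × Int) :=
  ([-1, 0, 1] : List Int).flatMap (fun dx =>
    ([-1, 0, 1] : List Int).flatMap (fun dy =>
      ([-1, 0, 1] : List Int).map (fun dz => (dx, dy, dz))))

-- buckets.setdefault((p[0], p[1], p[2]), []).append(p) over the whole list
def projKey (p : List Int) : Int × Int × Int :=
  (PySem.List.pyGetD p 0 0, PySem.List.pyGetD p 1 0, PySem.List.pyGetD p 2 0)

def bucketsOf (black_offsets : List (List Int)) :
    PySem.Dict (Int × Int × Int) (List (List Int)) :=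
  black_offsets.foldl
    (fun d p => PySem.Dict.modify d (projKey p) [] (fun l => l ++ [p]))
    PySem.Dict.empty

-- the 'while stack:' loop of B; fuel 2*n+1 is proved sufficient below (dfs_mem arithmetic)
def loopB (buckets : PySem.Dict (Int × Int × Int) (List (List Int))) :
    Nat → PySem.Set (List Int) → List (List Int) → PySem.Set (List Int)
  | 0, seen, _ => seen
  | fuel + 1, seen, stack =>
    match PySem.List.pop? stack (-1) with    -- curr = stack.pop()
    | none => seen
    | some (curr, rest) =>
      let x := PySem.List.pyGetD curr 0 0    -- x, y, z = curr[0], curr[1], curr[2]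
      let y := PySem.List.pyGetD curr 1 0
      let z := PySem.List.pyGetD curr 2 0
      let st := offsets27.foldl
        (fun (vs : PySem.Set (List Int) × List (List Int)) d =>
          (PySem.Dict.getD buckets (x + d.1, y + d.2.1, z + d.2.2) []).foldl
            (fun (vs' : PySem.Set (List Int) × List (List Int)) q =>
              if PySem.Set.contains vs'.1 q then vs'    -- 'if q not in seen'
              else (PySem.Set.add vs'.1 q, vs'.2 ++ [q]))
            vs)
        (seen, rest)
      loopB buckets fuel st.1 st.2

def check_26_connectivity_8ring_alt (black_offsets : List (List Int)) : Bool :=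
  if black_offsets = [] then true
  else
    let buckets := bucketsOf black_offsets
    let first := PySem.List.pyGetD black_offsets 0 []
    let seen := loopB buckets (2 * black_offsets.length + 1)
        (PySem.Set.add PySem.Set.empty first) [first]
    PySem.Set.len seen == PySem.List.len black_offsets

-- ===== PRECONDITION & SPEC =====
-- Pre_ excludes inputs containing an offset tuple with fewer than 3 coordinates: B reads
-- p[0], p[1], p[2] of every point up front and raises IndexError there, while A reads them
-- lazily during its traversal and may still return a value on such inputs.
def Pre_check_26_connectivity_8ring (black_offsets : List (List Int)) : Prop :=
  ∀ p ∈ black_offsets, 3 ≤ p.length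
instance (black_offsets : List (List Int)) : Decidable (Pre_check_26_connectivity_8ring black_offsets) := by unfold Pre_check_26_connectivity_8ring; infer_instance

def pvWitness_check_26_connectivity_8ring : List (List Int) := [[0, 0, 0], [1, 1, 0], [2, 1, 1]]

def Spec_check_26_connectivity_8ring (black_offsets : List (List Int)) (out : Bool) : Prop := out = check_26_connectivity_8ring_alt black_offsets
instance (black_offsets : List (List Int)) (out : Bool) : Decidable (Spec_check_26_connectivity_8ring black_offsets out) := by unfold Spec_check_26_connectivity_8ring; infer_instance

-- ===== CLAIM (what is proved, stated in full; the proofs are below) =====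
def Claim_equal_check_26_connectivity_8ring : Prop := ∀ (black_offsets : List (List Int)), Dom_check_26_connectivity_8ring black_offsets → Pre_check_26_connectivity_8ring black_offsets → Spec_check_26_connectivity_8ring black_offsets (check_26_connectivity_8ring black_offsets)

-- ===== LEMMAS AND PROOFS =====

-- A generic DFS loop covering both ports: candidates 'cand curr', acceptance 'P curr c'.
def dfsStep (P : List Int → List Int → Bool) (curr : List Int)
    (vs : PySem.Set (List Int) × List (List Int)) (c : List Int) :
    PySem.Set (List Int) × List (List Int) :=
  if !PySem.Set.contains vs.1 c && P curr c then (PySem.Set.add vs.1 c, vs.2 ++ [c]) else vs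

def dfsGo (cand : List Int → List (List Int)) (P : List Int → List Int → Bool) :
    Nat → PySem.Set (List Int) → List (List Int) → PySem.Set (List Int)
  | 0, v, _ => v
  | fuel + 1, v, s =>
    match PySem.List.pop? s (-1) with
    | none => v
    | some (curr, rest) =>
      let st := (cand curr).foldl (dfsStep P curr) (v, rest)
      dfsGo cand P fuel st.1 st.2

-- reachability along accepted candidate edges
inductive ReachG (cand : List Int → List (List Int)) (P : List Int → List Int → Bool)
    (x : List Int) : List Int → Prop
  | refl : ReachG cand P x x
  | tail {y z : List Int} : ReachG cand P x y → z ∈ cand y → P y z = true → ReachG cand P x z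

-- one pop step: the inner fold appends the same fresh block t to visited and to the stack
theorem fold_step (P : List Int → List Int → Bool) (curr : List Int)
    (l : List (List Int)) :
    ∀ (v s : List (List Int)), v.Nodup →
      ∃ t : List (List Int),
        l.foldl (dfsStep P curr) (v, s) = (v ++ t, s ++ t) ∧
        t.Nodup ∧ (∀ c ∈ t, c ∉ v) ∧ (∀ c ∈ t, c ∈ l ∧ P curr c = true) ∧
        (∀ c ∈ l, P curr c = true → c ∈ v ++ t) := by
  induction l with
  | nil =>
    intro v s _
    exact ⟨[], by simp, by simp, by simp, by simp, by simp⟩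
  | cons c l ih =>
    intro v s hv
    by_cases hc : c ∈ v
    · have hcontains : PySem.Set.contains v c = true := (PySem.Set.contains_iff v c).mpr hc
      simp only [PySem.Set.contains_eq_listContains] at hcontains
      have hstep : dfsStep P curr (v, s) c = (v, s) := by
        simp [dfsStep]
        exact fun h => absurd hc h
      obtain ⟨t, heq, ht1, ht2, ht3, ht4⟩ := ih v s hv
      refine ⟨t, ?_, ht1, ht2, ?_, ?_⟩
      · rw [List.foldl_cons, hstep]; exact heq
      · exact fun d hd => ⟨List.mem_cons_of_mem _ (ht3 d hd).1, (ht3 d hd).2⟩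
      · intro d hd hP
        rcases List.mem_cons.mp hd with rfl | hd'
        · exact List.mem_append.mpr (Or.inl hc)
        · exact ht4 d hd' hP
    · by_cases hP : P curr c = true
      · have hcontains : PySem.Set.contains v c = false := by
          rcases h : PySem.Set.contains v c with _ | _
          · rfl
          · exact absurd ((PySem.Set.contains_iff v c).mp h) hc
        simp only [PySem.Set.contains_eq_listContains] at hcontains
        have hstep : dfsStep P curr (v, s) c = (v ++ [c], s ++ [c]) := by
          simp [dfsStep, hP, PySem.Set.add_of_not_mem hc]
          exact hc
        have hv' : (v ++ [c]).Nodup := by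
          rw [List.nodup_append]
          refine ⟨hv, List.nodup_singleton c, ?_⟩
          intro a ha b hb
          simp only [List.mem_singleton] at hb
          subst hb
          exact fun h => hc (h ▸ ha)
        obtain ⟨t, heq, ht1, ht2, ht3, ht4⟩ := ih (v ++ [c]) (s ++ [c]) hv'
        refine ⟨c :: t, ?_, ?_, ?_, ?_, ?_⟩
        · rw [List.foldl_cons, hstep, heq]
          simp
        · refine List.nodup_cons.mpr ⟨fun hct => ?_, ht1⟩
          exact (ht2 c hct) (by simp)
        · intro d hd
          rcases List.mem_cons.mp hd with rfl | hd'
          · exact hc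
          · exact fun hdv => (ht2 d hd') (by simp [hdv])
        · intro d hd
          rcases List.mem_cons.mp hd with rfl | hd'
          · exact ⟨List.mem_cons_self, hP⟩
          · exact ⟨List.mem_cons_of_mem _ (ht3 d hd').1, (ht3 d hd').2⟩
        · intro d hd hPd
          rcases List.mem_cons.mp hd with rfl | hd'
          · simp
          · have := ht4 d hd' hPd
            simpa [List.append_assoc] using this
      · have hstep : dfsStep P curr (v, s) c = (v, s) := by
          simp [dfsStep, hP]
        obtain ⟨t, heq, ht1, ht2, ht3, ht4⟩ := ih v s hv
        refine ⟨t, ?_, ht1, ht2, ?_, ?_⟩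
        · rw [List.foldl_cons, hstep]; exact heq
        · exact fun d hd => ⟨List.mem_cons_of_mem _ (ht3 d hd).1, (ht3 d hd).2⟩
        · intro d hd hPd
          rcases List.mem_cons.mp hd with rfl | hd'
          · exact absurd hPd hP
          · exact ht4 d hd' hPd

theorem reach_trans {cand : List Int → List (List Int)} {P : List Int → List Int → Bool}
    {x y z : List Int} :
    ReachG cand P x y → ReachG cand P y z → ReachG cand P x z := by
  intro hxy hyz
  induction hyz with
  | refl => exact hxy
  | tail _ hc hP ih => exact ReachG.tail ih hc hP

theorem reach_absorb (cand : List Int → List (List Int)) (P : List Int → List Int → Bool)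
    (v' s' : List (List Int))
    (hcl : ∀ x ∈ v', x ∉ s' → ∀ y, y ∈ cand x → P x y = true → y ∈ v')
    {a z : List Int} (h : ReachG cand P a z) :
    a ∈ v' → z ∈ v' ∨ ∃ w ∈ s', ReachG cand P w z := by
  induction h with
  | refl => exact fun ha => Or.inl ha
  | @tail y z hxy hyc hyP ihr =>
    intro ha
    rcases ihr ha with hy | ⟨u, hu, hur⟩
    · by_cases hys : y ∈ s'
      · exact Or.inr ⟨y, hys, ReachG.tail ReachG.refl hyc hyP⟩
      · exact Or.inl (hcl y hy hys z hyc hyP)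
    · exact Or.inr ⟨u, hu, ReachG.tail hur hyc hyP⟩

-- the main characterisation: with enough fuel, the DFS visits exactly v ∪ Reach(stack)
theorem dfs_mem (cand : List Int → List (List Int)) (P : List Int → List Int → Bool)
    (G : List (List Int)) (hG : ∀ x y, y ∈ cand x → P x y = true → y ∈ G) :
    ∀ (fuel : Nat) (v s : List (List Int)), v.Nodup → (∀ x ∈ v, x ∈ G) →
      (∀ x ∈ s, x ∈ v) →
      (∀ x ∈ v, x ∉ s → ∀ y, y ∈ cand x → P x y = true → y ∈ v) →
      s.length + 2 * ((PySem.Set.ofList G).length - v.length) < fuel →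
      ((dfsGo cand P fuel v s).Nodup ∧
        ∀ z, z ∈ dfsGo cand P fuel v s ↔ z ∈ v ∨ ∃ w ∈ s, ReachG cand P w z) := by
  intro fuel
  induction fuel with
  | zero => intro v s _ _ _ _ hlt; omega
  | succ fuel ih =>
    intro v s hv hvG hsv hclosed hfuel
    rcases List.eq_nil_or_concat s with rfl | ⟨rest, curr, rfl⟩
    · constructor
      · simpa [dfsGo, PySem.List.pop?] using hv
      · intro z
        simp [dfsGo, PySem.List.pop?]
    · simp only [List.concat_eq_append] at hsv hclosed hfuel ⊢
      have hpop : PySem.List.pop? (rest ++ [curr]) (-1) = some (curr, rest) :=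
        PySem.List.pop?_last rest curr
      obtain ⟨t, heq, htnd, htv, htc, htcl⟩ := fold_step P curr (cand curr) v rest hv
      have hrun : dfsGo cand P (fuel + 1) v (rest ++ [curr]) =
          dfsGo cand P fuel (v ++ t) (rest ++ t) := by
        simp [dfsGo, hpop, heq]
      have hcurrv : curr ∈ v := hsv curr (by simp)
      have hv' : (v ++ t).Nodup := by
        rw [List.nodup_append]
        refine ⟨hv, htnd, ?_⟩
        intro a ha b hb h
        exact htv b hb (h ▸ ha)
      have hvG' : ∀ x ∈ v ++ t, x ∈ G := by
        intro x hx
        rcases List.mem_append.mp hx with hx | hx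
        · exact hvG x hx
        · exact hG curr x (htc x hx).1 (htc x hx).2
      have hsv' : ∀ x ∈ rest ++ t, x ∈ v ++ t := by
        intro x hx
        rcases List.mem_append.mp hx with hx | hx
        · exact List.mem_append.mpr (Or.inl (hsv x (by simp [hx])))
        · exact List.mem_append.mpr (Or.inr hx)
      have hclosed' : ∀ x ∈ v ++ t, x ∉ rest ++ t →
          ∀ y, y ∈ cand x → P x y = true → y ∈ v ++ t := by
        intro x hx hxs y hyc hyP
        have hxt : x ∉ t := fun h => hxs (List.mem_append.mpr (Or.inr h))
        have hxv : x ∈ v := by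
          rcases List.mem_append.mp hx with h | h
          · exact h
          · exact absurd h hxt
        by_cases hxcurr : x = curr
        · subst hxcurr
          exact htcl y hyc hyP
        · have hxold : x ∉ rest ++ [curr] := by
            intro h
            rcases List.mem_append.mp h with h | h
            · exact hxs (List.mem_append.mpr (Or.inl h))
            · exact hxcurr (by simpa using h)
          exact List.mem_append.mpr (Or.inl (hclosed x hxv hxold y hyc hyP))
      have hlen : v.length + t.length ≤ (PySem.Set.ofList G).length := by
        have hsub : v ++ t ⊆ PySem.Set.ofList G := by
          intro x hx
          exact (PySem.Set.mem_ofList G x).mpr (hvG' x hx)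
        have := (List.subperm_of_subset hv' hsub).length_le
        simpa using this
      have hfuel' : (rest ++ t).length +
          2 * ((PySem.Set.ofList G).length - (v ++ t).length) < fuel := by
        simp only [List.length_append, List.length_singleton] at hfuel ⊢
        generalize hL : List.length (PySem.Set.ofList G) = L at hlen hfuel ⊢
        omega
      obtain ⟨hnd, hmem⟩ := ih (v ++ t) (rest ++ t) hv' hvG' hsv' hclosed' hfuel'
      rw [hrun]
      refine ⟨hnd, fun z => ?_⟩
      rw [hmem z]
      constructor
      · rintro (hz | ⟨w, hw, hr⟩)
        · rcases List.mem_append.mp hz with hz | hz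
          · exact Or.inl hz
          · refine Or.inr ⟨curr, by simp, ?_⟩
            exact ReachG.tail ReachG.refl (htc z hz).1 (htc z hz).2
        · rcases List.mem_append.mp hw with hw | hw
          · exact Or.inr ⟨w, by simp [hw], hr⟩
          · refine Or.inr ⟨curr, by simp, ?_⟩
            exact reach_trans (ReachG.tail ReachG.refl (htc w hw).1 (htc w hw).2) hr
      · rintro (hz | ⟨w, hw, hr⟩)
        · exact Or.inl (List.mem_append.mpr (Or.inl hz))
        · rcases List.mem_append.mp hw with hw | hw
          · exact Or.inr ⟨w, List.mem_append.mpr (Or.inl hw), hr⟩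
          · have hwcurr : w = curr := by simpa using hw
            subst hwcurr
            exact reach_absorb cand P (v ++ t) (rest ++ t) hclosed' hr
              (List.mem_append.mpr (Or.inl hcurrv))

-- ----- instantiating the generic DFS with the two ports' candidate/acceptance pairs -----

def candA (bo : List (List Int)) : List Int → List (List Int) := fun _ => bo

def pA : List Int → List Int → Bool := fun curr other => decide (chebA curr other ≤ 1)

def candB (buckets : PySem.Dict (Int × Int × Int) (List (List Int))) :
    List Int → List (List Int) :=
  fun curr => offsets27.flatMap (fun d =>
    PySem.Dict.getD buckets
      (PySem.List.pyGetD curr 0 0 + d.1, PySem.List.pyGetD curr 1 0 + d.2.1,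
       PySem.List.pyGetD curr 2 0 + d.2.2) [])

def pB : List Int → List Int → Bool := fun _ _ => true

theorem loopA_eq (bo : List (List Int)) :
    ∀ (f : Nat) (v s : List (List Int)),
      loopA bo f v s = dfsGo (candA bo) pA f v s := by
  intro f
  induction f with
  | zero => intro v s; rfl
  | succ f ih =>
    intro v s
    rw [loopA, dfsGo]
    cases hp : PySem.List.pop? s (-1) with
    | none => rfl
    | some p =>
      obtain ⟨curr, rest⟩ := p
      have hstep : (fun (vs : PySem.Set (List Int) × List (List Int)) other =>
          if PySem.Set.contains vs.1 other then vs
          else if chebA curr other ≤ 1 then (PySem.Set.add vs.1 other, vs.2 ++ [other]) else vs)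
          = dfsStep pA curr := by
        funext vs other
        by_cases h1 : other ∈ vs.1
        · simp [dfsStep, pA, h1]
        · by_cases h2 : chebA curr other ≤ 1 <;> simp [dfsStep, pA, h1, h2]
      simp only [hstep, candA]
      exact ih _ _

theorem loopB_eq (buckets : PySem.Dict (Int × Int × Int) (List (List Int))) :
    ∀ (f : Nat) (v s : List (List Int)),
      loopB buckets f v s = dfsGo (candB buckets) pB f v s := by
  intro f
  induction f with
  | zero => intro v s; rfl
  | succ f ih =>
    intro v s
    rw [loopB, dfsGo]
    cases hp : PySem.List.pop? s (-1) with
    | none => rfl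
    | some p =>
      obtain ⟨curr, rest⟩ := p
      have hstep : (fun (vs' : PySem.Set (List Int) × List (List Int)) (q : List Int) =>
          if PySem.Set.contains vs'.1 q then vs'
          else (PySem.Set.add vs'.1 q, vs'.2 ++ [q])) = dfsStep pB curr := by
        funext vs' q
        by_cases h1 : q ∈ vs'.1
        · simp [dfsStep, pB, h1]
        · simp [dfsStep, pB, h1]
      have hfold : offsets27.foldl
          (fun (vs : PySem.Set (List Int) × List (List Int)) d =>
            (PySem.Dict.getD buckets
              (PySem.List.pyGetD curr 0 0 + d.1, PySem.List.pyGetD curr 1 0 + d.2.1,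
               PySem.List.pyGetD curr 2 0 + d.2.2) []).foldl
              (fun (vs' : PySem.Set (List Int) × List (List Int)) q =>
                if PySem.Set.contains vs'.1 q then vs'
                else (PySem.Set.add vs'.1 q, vs'.2 ++ [q]))
              vs) (v, rest) =
          (candB buckets curr).foldl (dfsStep pB curr) (v, rest) := by
        simp only [candB, List.foldl_flatMap, hstep]
      simp only [hfold]
      exact ih _ _

-- ----- the two adjacency relations generate the same reachability on length-≥3 points -----

theorem offsets_bound :
    ∀ d ∈ offsets27, |d.1| ≤ 1 ∧ |d.2.1| ≤ 1 ∧ |d.2.2| ≤ 1 := by decide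

theorem mem_offsets (u v w : Int) (hu : |u| ≤ 1) (hv : |v| ≤ 1) (hw : |w| ≤ 1) :
    (u, v, w) ∈ offsets27 := by
  obtain ⟨hu1, hu2⟩ := abs_le.mp hu
  obtain ⟨hv1, hv2⟩ := abs_le.mp hv
  obtain ⟨hw1, hw2⟩ := abs_le.mp hw
  have hu' : u = -1 ∨ u = 0 ∨ u = 1 := by omega
  have hv' : v = -1 ∨ v = 0 ∨ v = 1 := by omega
  have hw' : w = -1 ∨ w = 0 ∨ w = 1 := by omega
  rcases hu' with rfl | rfl | rfl <;> rcases hv' with rfl | rfl | rfl <;>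
    rcases hw' with rfl | rfl | rfl <;> decide

theorem pyGetD_one_cons {α : Type} (a b : α) (l : List α) (d : α) :
    PySem.List.pyGetD (a :: b :: l) (1 : Int) d = b := by
  rw [show ((1 : Int)) = ((1 : Nat) : Int) by norm_num, PySem.List.pyGetD_natCast]
  rfl

theorem pyGetD_two_cons {α : Type} (a b c : α) (l : List α) (d : α) :
    PySem.List.pyGetD (a :: b :: c :: l) (2 : Int) d = c := by
  rw [show ((2 : Int)) = ((2 : Nat) : Int) by norm_num, PySem.List.pyGetD_natCast]
  rfl

theorem chebA_eq (a b c d e f : Int) (r r' : List Int) :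
    chebA (a :: b :: c :: r) (d :: e :: f :: r') = max (max |a - d| |b - e|) |c - f| := by
  simp only [chebA, PySem.List.pyGetD_zero_cons, pyGetD_one_cons, pyGetD_two_cons]

theorem projKey_cons (a b c : Int) (r : List Int) :
    projKey (a :: b :: c :: r) = (a, b, c) := by
  simp only [projKey, PySem.List.pyGetD_zero_cons, pyGetD_one_cons, pyGetD_two_cons]

theorem len3_cases (p : List Int) (h : 3 ≤ p.length) :
    ∃ (a b c : Int) (r : List Int), p = a :: b :: c :: r := by
  rcases p with _ | ⟨a, p⟩
  · simp at h
  rcases p with _ | ⟨b, p⟩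
  · simp at h
  rcases p with _ | ⟨c, p⟩
  · simp at h
  exact ⟨a, b, c, p, rfl⟩

theorem getD_bucketsOf_aux (bo : List (List Int)) :
    ∀ (d : PySem.Dict (Int × Int × Int) (List (List Int))) (key : Int × Int × Int)
      (q : List Int),
      q ∈ PySem.Dict.getD
          (bo.foldl (fun d p => PySem.Dict.modify d (projKey p) [] (fun l => l ++ [p])) d)
          key [] ↔
        q ∈ PySem.Dict.getD d key [] ∨ (q ∈ bo ∧ projKey q = key) := by
  induction bo with
  | nil => intro d key q; simp
  | cons p bo ih =>
    intro d key q
    rw [List.foldl_cons, ih]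
    rw [PySem.Dict.getD_modify]
    by_cases hk : key = projKey p
    · subst hk
      rw [if_pos rfl]
      constructor
      · rintro (hq | hq)
        · rcases List.mem_append.mp hq with hq' | hq'
          · exact Or.inl hq'
          · have hqp : q = p := by simpa using hq'
            subst hqp
            exact Or.inr ⟨List.mem_cons_self, rfl⟩
        · exact Or.inr ⟨List.mem_cons_of_mem _ hq.1, hq.2⟩
      · rintro (hq | ⟨hq, hkey⟩)
        · exact Or.inl (List.mem_append.mpr (Or.inl hq))
        · rcases List.mem_cons.mp hq with rfl | hq'
          · exact Or.inl (List.mem_append.mpr (Or.inr (by simp)))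
          · exact Or.inr ⟨hq', hkey⟩
    · rw [if_neg hk]
      constructor
      · rintro (hq | hq)
        · exact Or.inl hq
        · exact Or.inr ⟨List.mem_cons_of_mem _ hq.1, hq.2⟩
      · rintro (hq | ⟨hq, hkey⟩)
        · exact Or.inl hq
        · rcases List.mem_cons.mp hq with rfl | hq'
          · exact absurd hkey.symm hk
          · exact Or.inr ⟨hq', hkey⟩

theorem mem_bucketsOf (bo : List (List Int)) (key : Int × Int × Int) (q : List Int) :
    q ∈ PySem.Dict.getD (bucketsOf bo) key [] ↔ q ∈ bo ∧ projKey q = key := by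
  rw [bucketsOf, getD_bucketsOf_aux]
  simp [PySem.Dict.empty, PySem.Dict.getD, PySem.Dict.get?]

theorem mem_candB (bo : List (List Int)) (curr q : List Int) :
    q ∈ candB (bucketsOf bo) curr ↔
      ∃ d ∈ offsets27, q ∈ bo ∧ projKey q =
        (PySem.List.pyGetD curr 0 0 + d.1, PySem.List.pyGetD curr 1 0 + d.2.1,
         PySem.List.pyGetD curr 2 0 + d.2.2) := by
  simp only [candB, List.mem_flatMap, mem_bucketsOf]

theorem reach_iff (bo : List (List Int))
    (hpre : ∀ p ∈ bo, 3 ≤ p.length) (start : List Int) (hstart : start ∈ bo) (z : List Int) :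
    ReachG (candA bo) pA start z ↔ ReachG (candB (bucketsOf bo)) pB start z := by
  constructor
  · intro h
    suffices hs : ReachG (candB (bucketsOf bo)) pB start z ∧ z ∈ bo from hs.1
    induction h with
    | refl => exact ⟨ReachG.refl, hstart⟩
    | @tail y z hxy hyc hyP ihr =>
      obtain ⟨hby, hybo⟩ := ihr
      have hzbo : z ∈ bo := hyc
      refine ⟨?_, hzbo⟩
      obtain ⟨a, b, c, r, rfl⟩ := len3_cases y (hpre y hybo)
      obtain ⟨d, e, f, r', rfl⟩ := len3_cases z (hpre _ hzbo)
      have hcheb : max (max |a - d| |b - e|) |c - f| ≤ 1 := by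
        have := of_decide_eq_true hyP
        rwa [chebA_eq] at this
      have h1 : |a - d| ≤ 1 := le_trans (le_trans (le_max_left _ _) (le_max_left _ _)) hcheb
      have h2 : |b - e| ≤ 1 := le_trans (le_trans (le_max_right _ _) (le_max_left _ _)) hcheb
      have h3 : |c - f| ≤ 1 := le_trans (le_max_right _ _) hcheb
      obtain ⟨h1a, h1b⟩ := abs_le.mp h1
      obtain ⟨h2a, h2b⟩ := abs_le.mp h2
      obtain ⟨h3a, h3b⟩ := abs_le.mp h3
      have hmem : (d - a, e - b, f - c) ∈ offsets27 :=
        mem_offsets _ _ _ (abs_le.mpr ⟨by omega, by omega⟩)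
          (abs_le.mpr ⟨by omega, by omega⟩) (abs_le.mpr ⟨by omega, by omega⟩)
      have hcand : (d :: e :: f :: r') ∈ candB (bucketsOf bo) (a :: b :: c :: r) := by
        rw [mem_candB]
        refine ⟨(d - a, e - b, f - c), hmem, hzbo, ?_⟩
        rw [projKey_cons]
        simp only [PySem.List.pyGetD_zero_cons, pyGetD_one_cons, pyGetD_two_cons]
        norm_num
      exact ReachG.tail hby hcand rfl
  · intro h
    suffices hs : ReachG (candA bo) pA start z ∧ z ∈ bo from hs.1
    induction h with
    | refl => exact ⟨ReachG.refl, hstart⟩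
    | @tail y z hxy hyc hyP ihr =>
      obtain ⟨hay, hybo⟩ := ihr
      obtain ⟨dd, hdmem, hzbo, hkey⟩ := (mem_candB bo y z).mp hyc
      refine ⟨?_, hzbo⟩
      obtain ⟨a, b, c, r, rfl⟩ := len3_cases y (hpre y hybo)
      obtain ⟨d, e, f, r', rfl⟩ := len3_cases z (hpre _ hzbo)
      obtain ⟨hb1, hb2, hb3⟩ := offsets_bound dd hdmem
      rw [projKey_cons] at hkey
      simp only [PySem.List.pyGetD_zero_cons, pyGetD_one_cons, pyGetD_two_cons,
        Prod.mk.injEq] at hkey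
      obtain ⟨hk1, hk2, hk3⟩ := hkey
      obtain ⟨hb1a, hb1b⟩ := abs_le.mp hb1
      obtain ⟨hb2a, hb2b⟩ := abs_le.mp hb2
      obtain ⟨hb3a, hb3b⟩ := abs_le.mp hb3
      have hPA : pA (a :: b :: c :: r) (d :: e :: f :: r') = true := by
        rw [pA, decide_eq_true_iff, chebA_eq]
        refine max_le (max_le (abs_le.mpr ⟨by omega, by omega⟩)
          (abs_le.mpr ⟨by omega, by omega⟩)) (abs_le.mpr ⟨by omega, by omega⟩)
      exact ReachG.tail hay hzbo hPA

theorem singleton_reach_iff (c : List Int → List (List Int)) (p : List Int → List Int → Bool)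
    (h z : List Int) :
    (z ∈ [h] ∨ ∃ w ∈ [h], ReachG c p w z) ↔ ReachG c p h z := by
  simp only [List.mem_singleton]
  constructor
  · rintro (rfl | ⟨w, rfl, hr⟩)
    · exact ReachG.refl
    · exact hr
  · intro hr
    exact Or.inr ⟨h, rfl, hr⟩

theorem final_eq (bo : List (List Int)) (hpre : ∀ p ∈ bo, 3 ≤ p.length) :
    check_26_connectivity_8ring bo = check_26_connectivity_8ring_alt bo := by
  cases bo with
  | nil => rfl
  | cons h t =>
    have hne : (h :: t : List (List Int)) ≠ [] := by simp
    have hstart : h ∈ h :: t := List.mem_cons_self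
    have hfirst : PySem.List.pyGetD (h :: t) (0 : Int) ([] : List Int) = h :=
      PySem.List.pyGetD_zero_cons h t []
    have hinit : PySem.Set.add PySem.Set.empty h = [h] := rfl
    have hle : (PySem.Set.ofList (h :: t)).length ≤ (h :: t).length :=
      PySem.Set.length_ofList_le _
    have hpos : 0 < (PySem.Set.ofList (h :: t)).length :=
      List.length_pos_of_mem ((PySem.Set.mem_ofList (h :: t) h).mpr hstart)
    have hfuel : ([h] : List (List Int)).length +
        2 * ((PySem.Set.ofList (h :: t)).length - ([h] : List (List Int)).length) <
        2 * (h :: t).length + 1 := by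
      simp only [List.length_cons, List.length_nil] at hle hpos ⊢
      omega
    obtain ⟨hndA, hmemA⟩ := dfs_mem (candA (h :: t)) pA (h :: t)
      (fun x y hy _ => hy) (2 * (h :: t).length + 1) [h] [h]
      (List.nodup_singleton h) (by simp) (fun x hx => hx)
      (fun x hx hxs => absurd hx hxs) hfuel
    obtain ⟨hndB, hmemB⟩ := dfs_mem (candB (bucketsOf (h :: t))) pB (h :: t)
      (fun x y hyc _ => by
        obtain ⟨dd, hdd, hq, hk⟩ := (mem_candB (h :: t) x y).mp hyc
        exact hq)
      (2 * (h :: t).length + 1) [h] [h]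
      (List.nodup_singleton h) (by simp) (fun x hx => hx)
      (fun x hx hxs => absurd hx hxs) hfuel
    have hmm : ∀ z, z ∈ dfsGo (candA (h :: t)) pA (2 * (h :: t).length + 1) [h] [h] ↔
        z ∈ dfsGo (candB (bucketsOf (h :: t))) pB (2 * (h :: t).length + 1) [h] [h] := by
      intro z
      rw [hmemA z, hmemB z, singleton_reach_iff, singleton_reach_iff]
      exact reach_iff (h :: t) hpre h hstart z
    have hperm : (dfsGo (candA (h :: t)) pA (2 * (h :: t).length + 1) [h] [h]).Perm
        (dfsGo (candB (bucketsOf (h :: t))) pB (2 * (h :: t).length + 1) [h] [h]) :=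
      (List.perm_ext_iff_of_nodup hndA hndB).mpr hmm
    have hlen := hperm.length_eq
    simp only [check_26_connectivity_8ring, check_26_connectivity_8ring_alt, if_neg hne,
      hfirst, hinit, loopA_eq, loopB_eq]
    simp only [PySem.Set.len, PySem.List.len, hlen]

-- ===== VERDICT (by name: the statement is the Claim_ definition above) =====
theorem check_26_connectivity_8ring_spec : Claim_equal_check_26_connectivity_8ring := by
  intro black_offsets _ hpre
  unfold Spec_check_26_connectivity_8ring
  exact final_eq black_offsets hpre
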